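-- pv_equiv track=rewrite | github.com/allofphysics/Python_Scripts | LCS.py | largest_substring_match
-- ===== SOURCE A (Python) =====
-- def largest_substring_match(string1, string2):
--     match = ""
--     lst = []
--     for letter in string1:
--         match += letter
--         if match in string2:
--             lst.append(match)
--         else:
--             lst.append("")
--             match = ""
--     return max(lst, key=len)
-- ===== SOURCE B (Python) =====
-- def largest_substring_match(string1, string2):
--     n2 = len(string2)
--     best = ""
--     cur = ""
--     ends = []          # end positions in string2 of occurrences of cur
--     for c in string1:
--         if cur:
--             ends = [e + 1 for e in ends if e < n2 and string2[e] == c]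
--         else:
--             ends = [j + 1 for j in range(n2) if string2[j] == c]
--         if ends:
--             cur += c
--             if len(cur) > len(best):
--                 best = cur
--         else:
--             cur = ""
--     return best
-- ===== Notes on version B (the rewrite author's own statement) =====
-- stated objective: alternative
-- what changed: B replaces A's repeated 'match in string2' substring scans and the candidate list + max(key=len) pass by an incremental occurrence tracker: it maintains the list of end positions of the current run inside string2, extends it one character at a time, and keeps a running first-longest match, so no substring search and no final max pass remain.
-- crash fix: A raises ValueError (max() of an empty list) when string1 is the empty string; B returns "" there. — e.g. on largest_substring_match("", "ab"): A raises ValueError, B returns ""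
import Mathlib
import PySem

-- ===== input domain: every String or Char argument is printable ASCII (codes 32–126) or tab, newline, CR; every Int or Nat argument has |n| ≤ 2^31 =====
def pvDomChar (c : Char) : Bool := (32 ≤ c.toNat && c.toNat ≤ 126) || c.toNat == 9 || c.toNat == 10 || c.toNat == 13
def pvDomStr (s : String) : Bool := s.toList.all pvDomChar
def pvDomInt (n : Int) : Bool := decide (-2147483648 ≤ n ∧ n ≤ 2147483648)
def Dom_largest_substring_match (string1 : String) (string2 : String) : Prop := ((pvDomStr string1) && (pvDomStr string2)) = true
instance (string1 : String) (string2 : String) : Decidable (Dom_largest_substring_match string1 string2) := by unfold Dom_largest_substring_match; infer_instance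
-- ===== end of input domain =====

-- B replaces A's repeated 'match in string2' substring scans and the list+max(key=len) pass by an
-- incremental end-position tracker with a running first-longest best (alternative algorithm, not faster in CPython).


-- ===== PORT A =====
-- loop body of A: match += letter; if match in string2: lst.append(match) else: lst.append(""); match = ""
def aStep (s2 : List Char) (st : List Char × List (List Char)) (letter : Char) :
    List Char × List (List Char) :=
  let m := st.1 ++ [letter]
  if PySem.Chars.isIn m s2 then (m, st.2 ++ [m]) else ([], st.2 ++ [([] : List Char)])

def largest_substring_match (string1 : String) (string2 : String) : String :=
  let st := string1.toList.foldl (aStep string2.toList) ([], [])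
  -- max(lst, key=len); Python raises ValueError on the empty lst (string1 = ""), excluded by Pre_
  match PySem.List.max? st.2 (fun x => x.length) with
  | some m => String.mk m
  | none => ""

-- ===== PORT B =====
-- loop body of B over state (best, cur, ends); string2[e] with the guard e < n2 is ported as
-- getD (the guard makes the default irrelevant), range(n2) as List.range n2 (exact: bound is a Nat)
def bStep (s2 : List Char) (st : List Char × List Char × List Nat) (c : Char) :
    List Char × List Char × List Nat :=
  let n2 := s2.length
  let ends :=
    if st.2.1 ≠ [] then
      (st.2.2.filter (fun e => decide (e < n2) && (s2.getD e c == c))).map (· + 1)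
    else
      ((List.range n2).filter (fun j => s2.getD j c == c)).map (· + 1)
  if ends ≠ [] then
    let cur := st.2.1 ++ [c]
    (if st.1.length < cur.length then cur else st.1, cur, ends)
  else (st.1, ([] : List Char), ends)

def largest_substring_match_alt (string1 : String) (string2 : String) : String :=
  let st := string1.toList.foldl (bStep string2.toList) ([], [], [])
  String.mk st.1

-- ===== PRECONDITION & SPEC =====
-- Pre_ excludes exactly string1 = "", on which Python's max([]) raises ValueError
def Pre_largest_substring_match (string1 : String) (string2 : String) : Prop := string1 ≠ ""
instance (string1 : String) (string2 : String) : Decidable (Pre_largest_substring_match string1 string2) := by unfold Pre_largest_substring_match; infer_instance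
def pvWitness_largest_substring_match : String × String := ("abab", "bab")

-- A raises ValueError (max() of an empty list) when string1 is the empty string; B returns "" there.
def Raises_largest_substring_match (string1 : String) (string2 : String) : Prop := string1 = ""
instance (string1 : String) (string2 : String) : Decidable (Raises_largest_substring_match string1 string2) := by unfold Raises_largest_substring_match; infer_instance
def pvRaiseWitness_largest_substring_match : String × String := ("", "ab")
def pvRaiseWitnessOut_largest_substring_match : String := ""

def Spec_largest_substring_match (string1 : String) (string2 : String) (out : String) : Prop := out = largest_substring_match_alt string1 string2
instance (string1 : String) (string2 : String) (out : String) : Decidable (Spec_largest_substring_match string1 string2 out) := by unfold Spec_largest_substring_match; infer_instance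

-- ===== CLAIM (what is proved, stated in full; the proofs are below) =====
def Claim_equal_largest_substring_match : Prop := ∀ (string1 : String) (string2 : String), Dom_largest_substring_match string1 string2 → Pre_largest_substring_match string1 string2 → Spec_largest_substring_match string1 string2 (largest_substring_match string1 string2)

def Claim_raises_largest_substring_match : Prop := (∀ (string1 : String) (string2 : String), Dom_largest_substring_match string1 string2 → Raises_largest_substring_match string1 string2 → ¬ Pre_largest_substring_match string1 string2) ∧ (Dom_largest_substring_match (pvRaiseWitness_largest_substring_match.1) (pvRaiseWitness_largest_substring_match.2) ∧ Raises_largest_substring_match (pvRaiseWitness_largest_substring_match.1) (pvRaiseWitness_largest_substring_match.2) ∧ largest_substring_match_alt (pvRaiseWitness_largest_substring_match.1) (pvRaiseWitness_largest_substring_match.2) = pvRaiseWitnessOut_largest_substring_match)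

-- ===== LEMMAS AND PROOFS =====

-- 'cs occurs in s2 ending at position e'
def Occ (s2 cs : List Char) (e : Nat) : Prop :=
  cs.length ≤ e ∧ e ≤ s2.length ∧ (s2.drop (e - cs.length)).take cs.length = cs

lemma occ_append (s2 cs : List Char) (c : Char) (e : Nat) :
    Occ s2 (cs ++ [c]) (e + 1) ↔ Occ s2 cs e ∧ e < s2.length ∧ s2.getD e c = c := by
  unfold Occ
  simp only [List.length_append, List.length_singleton]
  constructor
  · rintro ⟨h1, h2, h3⟩
    have hle : cs.length ≤ e := by omega
    have helt : e < s2.length := by omega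
    have hj : e + 1 - (cs.length + 1) = e - cs.length := by omega
    rw [hj] at h3
    rw [List.take_add_one] at h3
    have hget : (s2.drop (e - cs.length))[cs.length]? = some s2[e] := by
      rw [List.getElem?_drop]
      have h5 : e - cs.length + cs.length = e := by omega
      rw [h5, List.getElem?_eq_getElem helt]
    rw [hget] at h3
    simp only [Option.toList_some] at h3
    have h4 := List.append_inj' h3 rfl
    refine ⟨⟨hle, le_of_lt helt, h4.1⟩, helt, ?_⟩
    rw [List.getD_eq_getElem s2 c helt]
    exact (List.singleton_inj.mp h4.2)
  · rintro ⟨⟨h1, h2, h3⟩, helt, hc⟩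
    have hj : e + 1 - (cs.length + 1) = e - cs.length := by omega
    refine ⟨by omega, by omega, ?_⟩
    rw [hj, List.take_add_one, List.getElem?_drop]
    have h5 : e - cs.length + cs.length = e := by omega
    rw [h5, List.getElem?_eq_getElem helt, h3]
    rw [List.getD_eq_getElem s2 c helt] at hc
    simp [hc]

lemma occ_nil (s2 : List Char) (e : Nat) : Occ s2 [] e ↔ e ≤ s2.length := by
  unfold Occ; simp

lemma occ_single (s2 : List Char) (c : Char) (j : Nat) :
    Occ s2 [c] (j + 1) ↔ j < s2.length ∧ s2.getD j c = c := by
  have h := occ_append s2 [] c j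
  simp only [List.nil_append] at h
  rw [h, occ_nil]
  constructor
  · rintro ⟨_, hh⟩; exact hh
  · rintro ⟨h1, h2⟩; exact ⟨le_of_lt h1, h1, h2⟩

lemma isIn_iff_exists_occ (s2 cs : List Char) :
    PySem.Chars.isIn cs s2 = true ↔ ∃ e, Occ s2 cs e := by
  rw [← PySem.Chars.exists_prefix_drop_iff_isIn]
  constructor
  · rintro ⟨j, hpre⟩
    rcases eq_or_ne cs [] with rfl | hne
    · exact ⟨0, by simp [Occ]⟩
    · have hlen : cs.length ≤ (s2.drop j).length := hpre.length_le
      rw [List.length_drop] at hlen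
      have hj : j ≤ s2.length := by
        by_contra hcon
        exact hne (List.eq_nil_of_length_eq_zero (by omega))
      refine ⟨j + cs.length, by omega, by omega, ?_⟩
      have h5 : j + cs.length - cs.length = j := by omega
      rw [h5]
      exact (List.prefix_iff_eq_take.mp hpre).symm
  · rintro ⟨e, h1, h2, h3⟩
    exact ⟨e - cs.length, List.prefix_iff_eq_take.mpr h3.symm⟩

lemma mem_init (s2 : List Char) (c : Char) (e : Nat) :
    e ∈ ((List.range s2.length).filter (fun j => s2.getD j c == c)).map (· + 1) ↔
      Occ s2 [c] e := by
  simp only [List.mem_map, List.mem_filter, List.mem_range, beq_iff_eq]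
  constructor
  · rintro ⟨j, ⟨hj, hc⟩, rfl⟩
    exact (occ_single s2 c j).mpr ⟨hj, hc⟩
  · intro h
    have he : 1 ≤ e := h.1
    obtain ⟨j, rfl⟩ : ∃ j, e = j + 1 := ⟨e - 1, by omega⟩
    exact ⟨j, (occ_single s2 c j).mp h, rfl⟩

lemma mem_step (s2 cs : List Char) (c : Char) (ends : List Nat)
    (hinv : ∀ e, e ∈ ends ↔ Occ s2 cs e) (e' : Nat) :
    e' ∈ (ends.filter (fun e => decide (e < s2.length) && (s2.getD e c == c))).map (· + 1) ↔
      Occ s2 (cs ++ [c]) e' := by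
  simp only [List.mem_map, List.mem_filter, Bool.and_eq_true, decide_eq_true_eq, beq_iff_eq]
  constructor
  · rintro ⟨e, ⟨he, h1, h2⟩, rfl⟩
    exact (occ_append s2 cs c e).mpr ⟨(hinv e).mp he, h1, h2⟩
  · intro h
    have he : 1 ≤ e' := by
      have h6 := h.1; simp only [List.length_append, List.length_singleton] at h6; omega
    obtain ⟨e, rfl⟩ : ∃ e, e' = e + 1 := ⟨e' - 1, by omega⟩
    obtain ⟨h1, h2, h3⟩ := (occ_append s2 cs c e).mp h
    exact ⟨e, ⟨(hinv e).mpr h1, h2, h3⟩, rfl⟩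

lemma max?_append_singleton {α : Type} (l : List α) (y : α) (key : α → Nat) :
    PySem.List.max? (l ++ [y]) key =
      match PySem.List.max? l key with
      | none => some y
      | some m => if key m < key y then some y else some m := by
  simp only [PySem.List.max?, List.foldl_append, List.foldl]
  generalize (List.foldl
        (fun acc x =>
          match acc with
          | none => some x
          | some m => if key m < key x then some x else some m)
        none l) = o
  cases o <;> rfl

-- the coupling invariant between A's state (match, lst) and B's state (best, cur, ends)
def StInv (s2 : List Char) (stA : List Char × List (List Char))
    (stB : List Char × List Char × List Nat) : Prop :=
  stA.1 = stB.2.1 ∧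
  (stB.2.1 ≠ [] → ∀ e, e ∈ stB.2.2 ↔ Occ s2 stB.2.1 e) ∧
  ((stA.2 = [] ∧ stB.1 = []) ∨ PySem.List.max? stA.2 (fun x => x.length) = some stB.1)

lemma step_inv (s2 : List Char) (a : List Char × List (List Char))
    (b : List Char × List Char × List Nat) (c : Char) (h : StInv s2 a b) :
    StInv s2 (aStep s2 a c) (bStep s2 b c) := by
  obtain ⟨best, mA, ends⟩ := b
  obtain ⟨mA, lst⟩ := a
  obtain ⟨h1, h2, h3⟩ := h
  simp only at h1 h2 h3
  subst h1
  unfold aStep bStep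
  dsimp only
  set ends' := (if mA ≠ [] then
      (ends.filter (fun e => decide (e < s2.length) && (s2.getD e c == c))).map (· + 1)
    else
      ((List.range s2.length).filter (fun j => s2.getD j c == c)).map (· + 1)) with hE
  have hends' : ∀ e, e ∈ ends' ↔ Occ s2 (mA ++ [c]) e := by
    by_cases hc : mA = []
    · subst hc
      rw [hE, if_neg (by simp)]
      simpa using fun e => mem_init s2 c e
    · rw [hE, if_pos hc]
      exact mem_step s2 mA c ends (h2 hc)
  have hcond : PySem.Chars.isIn (mA ++ [c]) s2 = true ↔ ends' ≠ [] := by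
    rw [isIn_iff_exists_occ]
    constructor
    · rintro ⟨e, he⟩ hnil
      have hmem := (hends' e).mpr he
      rw [hnil] at hmem
      simp at hmem
    · intro hne
      obtain ⟨e, he⟩ := List.exists_mem_of_ne_nil _ hne
      exact ⟨e, (hends' e).mp he⟩
  by_cases hin : PySem.Chars.isIn (mA ++ [c]) s2 = true
  · rw [if_pos hin, if_pos (hcond.mp hin)]
    refine ⟨rfl, fun _ => hends', ?_⟩
    right
    rw [max?_append_singleton]
    rcases h3 with ⟨hl, hb⟩ | hmax
    · subst hl; subst hb
      simp [PySem.List.max?]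
    · rw [hmax]
      dsimp only
      by_cases hlt : best.length < (mA ++ [c]).length
      · rw [if_pos hlt, if_pos hlt]
      · rw [if_neg hlt, if_neg hlt]
  · rw [if_neg hin]
    have hnil : ends' = [] := by
      by_contra hne
      exact hin (hcond.mpr hne)
    rw [if_neg (by simp [hnil])]
    refine ⟨rfl, fun hh => absurd rfl hh, ?_⟩
    right
    rw [max?_append_singleton]
    rcases h3 with ⟨hl, hb⟩ | hmax
    · subst hl; subst hb
      simp [PySem.List.max?]
    · rw [hmax]
      simp

lemma loop_inv (s2 rest : List Char) (a : List Char × List (List Char))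
    (b : List Char × List Char × List Nat) (h : StInv s2 a b) :
    StInv s2 (rest.foldl (aStep s2) a) (rest.foldl (bStep s2) b) := by
  induction rest generalizing a b with
  | nil => exact h
  | cons c t ih => exact ih _ _ (step_inv s2 a b c h)

-- ===== VERDICT (by name: the statement is the Claim_ definition above) =====
theorem largest_substring_match_spec : Claim_equal_largest_substring_match := by
  intro s1 s2 _ _
  unfold Spec_largest_substring_match largest_substring_match largest_substring_match_alt
  have h := loop_inv s2.toList s1.toList ([], []) ([], [], [])
    ⟨rfl, by intro h; exact absurd rfl h, Or.inl ⟨rfl, rfl⟩⟩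
  rcases h.2.2 with ⟨hl, hb⟩ | hmax
  · simp only [hl, hb, PySem.List.max?]
    rfl
  · simp only [hmax]

@[simp]
theorem largest_substring_match_raises : Claim_raises_largest_substring_match := by
  unfold Claim_raises_largest_substring_match
  exact ⟨fun s1 s2 _ hr => by simpa [Pre_largest_substring_match] using hr, by decide⟩
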